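-- pv_equiv track=rewrite | github.com/mudraverma65/parts_interview | python_tasks/task_4_strings.py | format_sku
-- ===== SOURCE A (Python) =====
-- def format_sku(sku_string):
--     """
--     Instructions: Convert 'engine-oil-10w30' to 'Engine Oil 10w30'.
--     """
--     words = []
--     split_index = 0
--     for i in range(0, len(sku_string)):
--         word1 = ''
--         if sku_string[i] == '-':
--             word1 = sku_string[split_index:i]
--             split_index = i+1
--             words.append(word1.capitalize())
--         if i == len(sku_string)-1:
--             word1 = sku_string[split_index:i+1]
--             words.append(word1.capitalize())
--
--     combined_str = " ".join(word for word in words)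
--     return combined_str
-- ===== SOURCE B (Python) =====
-- def format_sku(sku_string):
--     return " ".join(w.capitalize() for w in sku_string.split("-"))
-- ===== Notes on version B (the rewrite author's own statement) =====
-- stated objective: idiomatic
-- what changed: Replaces A's character-by-character index loop that tracks delimiter positions and slices substrings manually with a single library split on the hyphen separator plus a capitalize-map joined by spaces.
import Mathlib
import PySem

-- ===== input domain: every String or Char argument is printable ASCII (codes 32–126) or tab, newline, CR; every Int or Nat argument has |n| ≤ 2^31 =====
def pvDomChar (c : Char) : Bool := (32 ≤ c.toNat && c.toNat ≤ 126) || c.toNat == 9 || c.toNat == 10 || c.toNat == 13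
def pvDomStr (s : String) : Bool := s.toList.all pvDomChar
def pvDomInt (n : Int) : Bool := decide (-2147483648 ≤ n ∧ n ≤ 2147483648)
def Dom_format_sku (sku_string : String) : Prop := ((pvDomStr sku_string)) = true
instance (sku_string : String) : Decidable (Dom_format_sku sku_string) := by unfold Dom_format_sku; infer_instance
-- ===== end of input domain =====

-- B replaces A's index loop with manual delimiter tracking and slicing by a single split("-")
-- plus a capitalize-map (objective: idiomatic).


-- ===== PORT A =====
-- str.capitalize(): upper-case the first character, lower-case the rest (exact on ASCII,
-- the stated domain); shared by both ports since both Pythons call .capitalize().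
def pyCapChars (w : List Char) : String :=
  match w with
  | [] => ""
  | c :: r => String.ofList (PySem.Chars.upperChar c :: r.map PySem.Chars.lowerChar)

def pyCapitalize (s : String) : String := pyCapChars s.toList

-- the body of A's 'for i in range(0, len(sku_string))' loop; state = (words, split_index)
def fsStep (s : String) (n : Int) (st : List String × Int) (i : Int) : List String × Int :=
  let st1 :=
    if PySem.Str.pyGet? s i = some '-' then
      (st.1 ++ [pyCapitalize (PySem.Str.slice s (some st.2) (some i))], i + 1)
    else st
  if i = n - 1 then
    (st1.1 ++ [pyCapitalize (PySem.Str.slice s (some st1.2) (some (i + 1)))], st1.2)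
  else st1

def format_sku (sku_string : String) : String :=
  PySem.Str.join " "
    (((PySem.List.pyRange 0 (PySem.Str.len sku_string) 1).foldl
        (fsStep sku_string (PySem.Str.len sku_string)) ([], 0)).1)

-- ===== PORT B =====
-- sku_string.split("-") with the nonempty literal separator is PySem.Chars.splitOn on the code points
def format_sku_alt (sku_string : String) : String :=
  PySem.Str.join " "
    ((PySem.Chars.splitOn sku_string.toList ['-']).map (fun w => pyCapitalize (String.ofList w)))

-- ===== PRECONDITION & SPEC =====
def Spec_format_sku (sku_string : String) (out : String) : Prop := out = format_sku_alt sku_string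
instance (sku_string : String) (out : String) : Decidable (Spec_format_sku sku_string out) := by unfold Spec_format_sku; infer_instance

-- ===== CLAIM (what is proved, stated in full; the proofs are below) =====
def Claim_equal_format_sku : Prop := ∀ (sku_string : String), Dom_format_sku sku_string → Spec_format_sku sku_string (format_sku sku_string)

-- ===== LEMMAS AND PROOFS =====

-- split on a single delimiter character, structurally
def splitChar (d : Char) : List Char → List (List Char)
  | [] => [[]]
  | c :: rest =>
      if c = d then [] :: splitChar d rest
      else List.modifyHead (fun w => c :: w) (splitChar d rest)

lemma splitChar_ne_nil (d : Char) (l : List Char) : splitChar d l ≠ [] := by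
  cases l with
  | nil => simp [splitChar]
  | cons c rest =>
      simp only [splitChar]
      split_ifs
      · simp
      · cases h : splitChar d rest with
        | nil => exact absurd h (splitChar_ne_nil d rest)
        | cons w t => simp

lemma splitOn_go_single (d : Char) :
    ∀ (fuel : Nat) (l cur : List Char) (acc : List (List Char)), l.length < fuel →
      PySem.Chars.splitOn.go [d] fuel l cur acc
        = acc.reverse ++ List.modifyHead (fun w => cur.reverse ++ w) (splitChar d l) := by
  intro fuel
  induction fuel with
  | zero => intro l cur acc h; omega
  | succ fuel ih =>
      intro l cur acc h
      cases l with
      | nil => simp [PySem.Chars.splitOn.go, splitChar]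
      | cons c rest =>
          by_cases hc : c = d
          · have hpre : List.isPrefixOf [d] (c :: rest) = true := by
              simp [List.isPrefixOf, hc]
            rw [show PySem.Chars.splitOn.go [d] (fuel + 1) (c :: rest) cur acc
                  = PySem.Chars.splitOn.go [d] fuel (List.drop 1 (c :: rest)) [] (cur.reverse :: acc) by
                  simp [PySem.Chars.splitOn.go, hpre]]
            rw [ih _ _ _ (by simpa using Nat.lt_of_succ_lt_succ h)]
            cases hs : splitChar d rest with
            | nil => exact absurd hs (splitChar_ne_nil d rest)
            | cons w t => simp [splitChar, hc, hs]
          · have hpre : List.isPrefixOf [d] (c :: rest) = false := by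
              simp [List.isPrefixOf]
              exact fun hdc => absurd hdc.symm hc
            rw [show PySem.Chars.splitOn.go [d] (fuel + 1) (c :: rest) cur acc
                  = PySem.Chars.splitOn.go [d] fuel rest (c :: cur) acc by
                  simp [PySem.Chars.splitOn.go, hpre]]
            rw [ih _ _ _ (by simpa using Nat.lt_of_succ_lt_succ h)]
            cases hs : splitChar d rest with
            | nil => exact absurd hs (splitChar_ne_nil d rest)
            | cons w t => simp [splitChar, hc, hs]

lemma splitOn_single (d : Char) (l : List Char) :
    PySem.Chars.splitOn l [d] = splitChar d l := by
  have h := splitOn_go_single d (l.length + 1) l [] [] (by omega)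
  cases hs : splitChar d l with
  | nil => exact absurd hs (splitChar_ne_nil d l)
  | cons w t =>
      rw [hs] at h
      simpa [PySem.Chars.splitOn, hs] using h

-- one step of widening a take by the element at its end
lemma take_succ_getElem (l : List Char) (k i : Nat) (hk : k ≤ i) (hi : i < l.length) :
    (l.drop k).take (i - k) ++ [l[i]] = (l.drop k).take (i + 1 - k) := by
  have h1 : i + 1 - k = (i - k) + 1 := by omega
  rw [h1, List.take_add_one]
  have h2 : (l.drop k)[i - k]? = some l[i] := by
    rw [List.getElem?_drop]
    have h3 : k + (i - k) = i := by omega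
    rw [h3, List.getElem?_eq_getElem hi]
  simp [h2]

-- A's slice sku[k:i] capitalized, in list form
lemma capSlice (s : String) (k i : Nat) :
    pyCapitalize (PySem.Str.slice s (some (k : Int)) (some (i : Int)))
      = pyCapChars ((s.toList.drop k).take (i - k)) := by
  rw [pyCapitalize, PySem.Str.toList_slice]
  simp [PySem.List.slice_natCast]

-- one loop iteration of A at a non-final index
lemma fsStep_mid (s : String) (i k : Nat) (c : Char) (ws : List String)
    (hgi : s.toList[i]? = some c) (hlast : i + 1 < s.toList.length) :
    fsStep s ((s.length : Int)) (ws, (k : Int)) (i : Int)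
      = if c = '-'
        then (ws ++ [pyCapChars ((s.toList.drop k).take (i - k))], (i : Int) + 1)
        else (ws, (k : Int)) := by
  have h1 : PySem.Str.pyGet? s (i : Int) = some c := by simp [hgi]
  have h2 : ¬ ((i : Int) = (s.length : Int) - 1) := by
    rw [← String.length_toList]; omega
  unfold fsStep
  rw [h1, if_neg h2]
  by_cases hc : c = '-' <;> simp [hc, capSlice]

-- the final loop iteration of A (i = len - 1)
lemma fsStep_last (s : String) (i k : Nat) (c : Char) (ws : List String)
    (hgi : s.toList[i]? = some c) (hlast : i + 1 = s.toList.length) :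
    fsStep s ((s.length : Int)) (ws, (k : Int)) (i : Int)
      = if c = '-'
        then (ws ++ [pyCapChars ((s.toList.drop k).take (i - k)), pyCapChars []], (i : Int) + 1)
        else (ws ++ [pyCapChars ((s.toList.drop k).take (i + 1 - k))], (k : Int)) := by
  have h1 : PySem.Str.pyGet? s (i : Int) = some c := by simp [hgi]
  have h2 : (i : Int) = (s.length : Int) - 1 := by
    rw [← String.length_toList]; omega
  have hcast : (i : Int) + 1 = ((i + 1 : Nat) : Int) := by push_cast; ring
  unfold fsStep
  rw [h1, if_pos h2]
  by_cases hc : c = '-'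
  · have hsl2 : pyCapitalize (PySem.Str.slice s (some ((i : Int) + 1)) (some ((i : Int) + 1)))
        = pyCapChars [] := by
      rw [hcast, capSlice]; simp
    simp [hc, capSlice, hsl2]
  · have hsl : pyCapitalize (PySem.Str.slice s (some (k : Int)) (some ((i : Int) + 1)))
        = pyCapChars ((s.toList.drop k).take (i + 1 - k)) := by
      rw [hcast, capSlice]
    simp [hc, hsl]

-- the loop invariant of A: folding from index i with split_index k and accumulated words ws
lemma loopA (s : String) :
    ∀ (m i k : Nat) (ws : List String),
      s.toList.length = i + m + 1 → k ≤ i →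
      ((PySem.List.pyRange (i : Int) ((s.length : Int)) 1).foldl
          (fsStep s ((s.length : Int))) (ws, (k : Int))).1
        = ws ++ (List.modifyHead (fun w => (s.toList.drop k).take (i - k) ++ w)
                  (splitChar '-' (s.toList.drop i))).map pyCapChars := by
  intro m
  induction m with
  | zero =>
      intro i k ws hlen hk
      have hi : i < s.toList.length := by omega
      have hrange : PySem.List.pyRange (i : Int) ((s.length : Int)) 1 = [(i : Int)] := by
        have hl : ((s.length : Int)) = (i : Int) + 1 := by
          rw [← String.length_toList]; omega
        rw [hl]; exact PySem.List.pyRange_one_singleton (i : Int)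
      have hgi : s.toList[i]? = some s.toList[i] := List.getElem?_eq_getElem hi
      have hdrop : s.toList.drop i = [s.toList[i]] := by
        rw [List.drop_eq_getElem_cons hi, List.drop_eq_nil_of_le (by omega)]
      rw [hrange, List.foldl_cons, List.foldl_nil,
        fsStep_last s i k s.toList[i] ws hgi (by omega)]
      by_cases hc : s.toList[i] = '-'
      · simp [hc, hdrop, splitChar]
      · rw [if_neg hc]
        simp only [hdrop, splitChar, if_neg hc, List.modifyHead, List.map_cons, List.map_nil]
        rw [← take_succ_getElem s.toList k i hk hi]
  | succ m ih =>
      intro i k ws hlen hk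
      have hi : i < s.toList.length := by omega
      have hcons : PySem.List.pyRange (i : Int) ((s.length : Int)) 1
          = (i : Int) :: PySem.List.pyRange ((i : Int) + 1) ((s.length : Int)) 1 := by
        refine PySem.List.pyRange_one_cons ?_
        rw [← String.length_toList]; omega
      have hgi : s.toList[i]? = some s.toList[i] := List.getElem?_eq_getElem hi
      have hdrop : s.toList.drop i = s.toList[i] :: s.toList.drop (i + 1) :=
        List.drop_eq_getElem_cons hi
      have hi1 : (i : Int) + 1 = ((i + 1 : Nat) : Int) := by push_cast; ring
      rw [hcons, List.foldl_cons, fsStep_mid s i k s.toList[i] ws hgi (by omega)]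
      by_cases hc : s.toList[i] = '-'
      · rw [if_pos hc, hi1, ih (i + 1) (i + 1) _ (by omega) (le_refl _)]
        cases hs : splitChar '-' (s.toList.drop (i + 1)) with
        | nil => exact absurd hs (splitChar_ne_nil _ _)
        | cons w t => simp [hdrop, splitChar, hc, hs]
      · rw [if_neg hc, hi1, ih (i + 1) k _ (by omega) (by omega)]
        cases hs : splitChar '-' (s.toList.drop (i + 1)) with
        | nil => exact absurd hs (splitChar_ne_nil _ _)
        | cons w t =>
            have hgrow : (s.toList.drop k).take (i + 1 - k) ++ w
                = (s.toList.drop k).take (i - k) ++ (s.toList[i] :: w) := by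
              rw [← take_succ_getElem s.toList k i hk hi]; simp
            rw [hdrop]
            simp only [splitChar, if_neg hc, hs, List.modifyHead, List.map_cons]
            rw [hgrow]

-- ===== VERDICT (by name: the statement is the Claim_ definition above) =====
theorem format_sku_spec : Claim_equal_format_sku := by
  intro s _
  unfold Spec_format_sku format_sku format_sku_alt
  rw [splitOn_single]
  have hn : PySem.Str.len s = ((s.length : Int)) := by simp
  rw [hn]
  cases hcs : s.toList with
  | nil =>
      have hs : s = "" := String.toList_eq_nil_iff.mp hcs
      subst hs
      decide
  | cons c rest =>
      have hlen : s.toList.length = 0 + (s.toList.length - 1) + 1 := by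
        rw [hcs]; simp
      have hmain := loopA s (s.toList.length - 1) 0 0 [] hlen (le_refl 0)
      simp only [Nat.cast_zero] at hmain
      rw [hmain]
      rw [hcs]
      cases hs : splitChar '-' (c :: rest) with
      | nil => exact absurd hs (splitChar_ne_nil _ _)
      | cons w t => simp [hs, pyCapitalize]
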